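-- pv_equiv track=rewrite | github.com/michaelkpenta/AOC2023_day2 | main.py | get_minimum_set_list
-- ===== SOURCE A (Python) =====
-- def get_colors_in_round(round_string: str):
--     color_list = round_string.strip().split(",")
--     colors = {"red": 0, "green": 0, "blue": 0}
--     for col in color_list:
--         [count, color] = col.split()
--         colors[color] = int(count)
--     return colors
--
-- def get_minimum_set_list(games: list):
--     min_set_for_games = []
--     color_keys = ["red", "green", "blue"]
--     for game in games:
--         minimum_set = {}
--         for game_round in game[1]:
--             round_colors = get_colors_in_round(game_round)
--             for c in color_keys:
--                 if c not in minimum_set or round_colors[c] > minimum_set[c]: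
--                     minimum_set[c] = round_colors[c]
--         min_set_for_games.append(minimum_set)
--     return min_set_for_games
-- ===== SOURCE B (Python) =====
-- def get_minimum_set_list(games: list):
--     # Sort-then-overwrite: flatten each game's rounds into (value, color) records,
--     # sort them ascending by value, then write them into a dict in order so the
--     # last write per color is that color's maximum.
--     result = []
--     for game in games:
--         rounds = game[1]
--         if not rounds:
--             result.append({})
--             continue
--         records = []
--         for r in rounds:
--             seen = {"red": 0, "green": 0, "blue": 0}
--             for part in r.strip().split(","):
--                 count, color = part.split()
--                 seen[color] = int(count)
--             for c in ("red", "green", "blue"):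
--                 records.append((seen[c], c))
--         records.sort(key=lambda rec: rec[0])
--         best = {}
--         for v, c in records:
--             best[c] = v
--         result.append({c: best[c] for c in ("red", "green", "blue")})
--     return result
-- ===== Notes on version B (the rewrite author's own statement) =====
-- stated objective: alternative
-- what changed: B replaces A's incremental per-color 'if greater then update' dict fold with a sort-based aggregation: it flattens each game's rounds into (value, color) records, sorts them ascending by value, and overwrites a dict in sorted order so the last write per color is the maximum.
import Mathlib
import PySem

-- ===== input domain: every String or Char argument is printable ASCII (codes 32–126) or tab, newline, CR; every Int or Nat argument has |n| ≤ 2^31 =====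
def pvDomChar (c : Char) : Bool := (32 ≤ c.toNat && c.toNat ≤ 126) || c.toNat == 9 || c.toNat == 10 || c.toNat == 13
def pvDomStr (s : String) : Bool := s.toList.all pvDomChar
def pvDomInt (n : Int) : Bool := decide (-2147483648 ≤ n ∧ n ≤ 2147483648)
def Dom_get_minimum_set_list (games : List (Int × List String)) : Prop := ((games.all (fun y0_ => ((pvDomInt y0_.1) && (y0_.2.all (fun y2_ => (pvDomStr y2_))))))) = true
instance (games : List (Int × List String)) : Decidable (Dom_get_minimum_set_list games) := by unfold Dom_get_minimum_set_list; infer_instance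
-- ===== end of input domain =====

-- B computes each game's minimum cube set by a sort-based aggregation (flatten the rounds
-- into (value, color) records, sort ascending by value, overwrite a dict in that order so
-- the last write per color is the maximum) instead of A's incremental
-- parse-and-conditionally-update dict loop ('alternative').

-- ===== PORT A =====
-- s.split(",") : the sep is non-empty, so PySem.Str.split? is always some (getD never taken)
def pvSplitComma (s : String) : List String := (PySem.Str.split? s ",").getD []

-- the seeded zero dict {"red": 0, "green": 0, "blue": 0}
def pvSeed : PySem.Dict String Int := PySem.Dict.ofList [("red", 0), ("green", 0), ("blue", 0)]

-- get_colors_in_round: none = the round raises (ValueError from unpacking or int())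
def get_colors_in_round (round_string : String) : Option (PySem.Dict String Int) :=
  (pvSplitComma (PySem.Str.strip round_string)).foldl
    (fun acc col => acc.bind (fun colors =>
      match PySem.Str.split₀ col with
      | [count, color] => (PySem.Int.ofStr? count).map (fun n => colors.insert color n)
      | _ => none))
    (some pvSeed)

def get_minimum_set_list (games : List (Int × List String)) : List (List (String × Int)) :=
  games.foldl (fun min_set_for_games game =>
    let minimum_set := game.2.foldl (fun ms game_round =>
      -- Pre_ excludes the raising rounds, so the .getD pvSeed default is never taken
      let round_colors := (get_colors_in_round game_round).getD pvSeed
      ["red", "green", "blue"].foldl (fun ms c =>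
        if !ms.contains c || round_colors.getD c 0 > ms.getD c 0 then
          ms.insert c (round_colors.getD c 0)
        else ms) ms) PySem.Dict.empty
    min_set_for_games ++ [minimum_set.items]) []

-- ===== PORT B =====
-- B's per-round parse: the seeded dict after processing every 'count color' part.
-- Pre_ excludes the raising rounds, so the int() fallback (.getD 0) and the skip arm
-- of the match are never taken.
def pvSeen (r : String) : PySem.Dict String Int :=
  (pvSplitComma (PySem.Str.strip r)).foldl
    (fun seen part =>
      match PySem.Str.split₀ part with
      | [count, color] => seen.insert color ((PySem.Int.ofStr? count).getD 0)
      | _ => seen)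
    pvSeed

def get_minimum_set_list_alt (games : List (Int × List String)) : List (List (String × Int)) :=
  games.foldl (fun result game =>
    if game.2.isEmpty then result ++ [[]]
    else
      let records := game.2.foldl (fun recs r =>
        let seen := pvSeen r
        recs ++ (["red", "green", "blue"].map (fun c => (seen.getD c 0, c)))) []
      let recs := PySem.List.sorted records (fun rec => rec.1) false
      let best := recs.foldl (fun d p => d.insert p.2 p.1) PySem.Dict.empty
      -- rounds are non-empty here, so best[c] exists for each of the three colors
      result ++ [["red", "green", "blue"].map (fun c => (c, best.getD c 0))]) []

-- ===== PRECONDITION & SPEC =====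
-- Pre_ excludes exactly the inputs on which the Python A raises a ValueError: a round with
-- a comma-piece whose whitespace split is not exactly two words, or whose count int() rejects.
def pvRoundOk (r : String) : Bool :=
  (pvSplitComma (PySem.Str.strip r)).all (fun col =>
    match PySem.Str.split₀ col with
    | [count, _color] => (PySem.Int.ofStr? count).isSome
    | _ => false)

def Pre_get_minimum_set_list (games : List (Int × List String)) : Prop :=
  (games.all (fun game => game.2.all pvRoundOk)) = true
instance (games : List (Int × List String)) : Decidable (Pre_get_minimum_set_list games) := by
  unfold Pre_get_minimum_set_list; infer_instance

def pvWitness_get_minimum_set_list : (List (Int × List String)) :=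
  [(1, ["3 red, 2 green", "1 blue"]), (2, [])]

def Spec_get_minimum_set_list (games : List (Int × List String)) (out : List (List (String × Int))) : Prop := out = get_minimum_set_list_alt games
instance (games : List (Int × List String)) (out : List (List (String × Int))) : Decidable (Spec_get_minimum_set_list games out) := by unfold Spec_get_minimum_set_list; infer_instance

-- ===== CLAIM (what is proved, stated in full; the proofs are below) =====
def Claim_equal_get_minimum_set_list : Prop := ∀ (games : List (Int × List String)), Dom_get_minimum_set_list games → Pre_get_minimum_set_list games → Spec_get_minimum_set_list games (get_minimum_set_list games)

-- ===== LEMMAS AND PROOFS =====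

-- A's value of color c in round r (what round_colors[c] reads), and B's
def pvValA (r c : String) : Int := ((get_colors_in_round r).getD pvSeed).getD c 0
def pvValB (r c : String) : Int := (pvSeen r).getD c 0

-- the dict {"red": a, "green": b, "blue": d} (the shape A's minimum_set always has)
def pvTriple (a b d : Int) : PySem.Dict String Int :=
  PySem.Dict.mk [("red", a), ("green", b), ("blue", d)]

-- Python's `if x > acc` maximum step
def pvMx (a n : Int) : Int := if a < n then n else a

-- A's per-color conditional update, and its per-round update of minimum_set
def pvF (rc ms : PySem.Dict String Int) (c : String) : PySem.Dict String Int :=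
  if !ms.contains c || rc.getD c 0 > ms.getD c 0 then ms.insert c (rc.getD c 0) else ms

def pvStepR (ms : PySem.Dict String Int) (game_round : String) : PySem.Dict String Int :=
  ["red", "green", "blue"].foldl (pvF ((get_colors_in_round game_round).getD pvSeed)) ms

-- B's flattened record table for one game
def pvRecords (rs : List String) : List (Int × String) :=
  rs.flatMap (fun r => [(pvValB r "red", "red"), (pvValB r "green", "green"), (pvValB r "blue", "blue")])

lemma pv_parse_eq (cols : List String) (h : cols.all (fun col =>
      match PySem.Str.split₀ col with
      | [count, _color] => (PySem.Int.ofStr? count).isSome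
      | _ => false) = true) : ∀ (d : PySem.Dict String Int),
    cols.foldl (fun acc col => acc.bind (fun colors =>
      match PySem.Str.split₀ col with
      | [count, color] => (PySem.Int.ofStr? count).map (fun n => colors.insert color n)
      | _ => none)) (some d) =
    some (cols.foldl (fun seen part =>
      match PySem.Str.split₀ part with
      | [count, color] => seen.insert color ((PySem.Int.ofStr? count).getD 0)
      | _ => seen) d) := by
  induction cols with
  | nil => intro d; rfl
  | cons col cols ih =>
    intro d
    simp only [List.all_cons, Bool.and_eq_true] at h
    obtain ⟨h1, h2⟩ := h
    simp only [List.foldl_cons]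
    match hs : PySem.Str.split₀ col with
    | [count, color] =>
      simp only [hs] at h1 ⊢
      obtain ⟨n, hn⟩ := Option.isSome_iff_exists.mp h1
      simp only [hn, Option.bind_some, Option.map_some, Option.getD_some]
      exact ih h2 _
    | [] => simp [hs] at h1
    | [x] => simp [hs] at h1
    | x :: y :: z :: rest => simp [hs] at h1

lemma pv_parse_some (r : String) (h : pvRoundOk r = true) :
    get_colors_in_round r = some (pvSeen r) := by
  unfold get_colors_in_round pvSeen
  exact pv_parse_eq _ h pvSeed

lemma pv_val_eq (r c : String) (h : pvRoundOk r = true) : pvValA r c = pvValB r c := by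
  unfold pvValA pvValB
  rw [pv_parse_some r h, Option.getD_some]

lemma pv_step_empty (r : String) :
    pvStepR PySem.Dict.empty r = pvTriple (pvValA r "red") (pvValA r "green") (pvValA r "blue") := by
  rfl

lemma pv_upd_red (rc : PySem.Dict String Int) (a b d : Int) :
    pvF rc (pvTriple a b d) "red" = pvTriple (pvMx a (rc.getD "red" 0)) b d := by
  unfold pvF pvTriple pvMx
  simp only [PySem.Dict.contains, PySem.Dict.insert, PySem.Dict.getD, PySem.Dict.get?,
    List.find?, List.any]
  norm_num
  split_ifs <;> simp_all

lemma pv_upd_green (rc : PySem.Dict String Int) (a b d : Int) :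
    pvF rc (pvTriple a b d) "green" = pvTriple a (pvMx b (rc.getD "green" 0)) d := by
  unfold pvF pvTriple pvMx
  simp only [PySem.Dict.contains, PySem.Dict.insert, PySem.Dict.getD, PySem.Dict.get?,
    List.find?, List.any]
  norm_num
  split_ifs <;> simp_all

lemma pv_upd_blue (rc : PySem.Dict String Int) (a b d : Int) :
    pvF rc (pvTriple a b d) "blue" = pvTriple a b (pvMx d (rc.getD "blue" 0)) := by
  unfold pvF pvTriple pvMx
  simp only [PySem.Dict.contains, PySem.Dict.insert, PySem.Dict.getD, PySem.Dict.get?,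
    List.find?, List.any]
  norm_num
  split_ifs <;> simp_all

lemma pv_step_triple (a b d : Int) (r : String) :
    pvStepR (pvTriple a b d) r =
      pvTriple (pvMx a (pvValA r "red")) (pvMx b (pvValA r "green")) (pvMx d (pvValA r "blue")) := by
  unfold pvStepR
  simp only [List.foldl_cons, List.foldl_nil, pv_upd_red, pv_upd_green, pv_upd_blue]
  rfl

lemma pv_fold_triple (rest : List String) : ∀ a b d : Int,
    rest.foldl pvStepR (pvTriple a b d) =
      pvTriple ((rest.map (pvValA · "red")).foldl pvMx a)
               ((rest.map (pvValA · "green")).foldl pvMx b)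
               ((rest.map (pvValA · "blue")).foldl pvMx d) := by
  induction rest with
  | nil => intro a b d; rfl
  | cons r rest ih =>
    intro a b d
    simp only [List.foldl_cons, List.map_cons, pv_step_triple]
    exact ih _ _ _

-- the running-max fold equals any element that bounds the whole list
lemma pv_fold_max_eq (vs : List Int) : ∀ (v0 m : Int), (m = v0 ∨ m ∈ vs) → v0 ≤ m →
    (∀ y ∈ vs, y ≤ m) → vs.foldl pvMx v0 = m := by
  induction vs with
  | nil =>
    intro v0 m hmem h0 _
    rcases hmem with h | h
    · exact h.symm
    · simp at h
  | cons y vs ih =>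
    intro v0 m hmem h0 hub
    have hy : y ≤ m := hub y (by simp)
    simp only [List.foldl_cons]
    rcases hmem with h | h
    · -- m = v0: pvMx v0 y = m
      apply ih (pvMx v0 y) m
      · left; unfold pvMx; subst h; split <;> omega
      · unfold pvMx; split <;> omega
      · exact fun z hz => hub z (by simp [hz])
    · simp only [List.mem_cons] at h
      rcases h with h | h
      · apply ih (pvMx v0 y) m
        · left; unfold pvMx; subst h; split <;> omega
        · unfold pvMx; split <;> omega
        · exact fun z hz => hub z (by simp [hz])
      · apply ih (pvMx v0 y) m
        · right; exact h
        · unfold pvMx; split <;> omega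
        · exact fun z hz => hub z (by simp [hz])

-- lookup in the overwrite fold = last matching record
lemma pv_look_get (es : List (Int × String)) : ∀ (d : PySem.Dict String Int) (c : String),
    (es.foldl (fun d p => d.insert p.2 p.1) d).get? c =
      match (es.reverse.find? (fun p => c == p.2)).map (·.1) with
      | some v => some v
      | none => d.get? c := by
  induction es with
  | nil => intro d c; simp
  | cons p ps ih =>
    intro d c
    simp only [List.foldl_cons, ih, List.reverse_cons, List.find?_append]
    cases h : (ps.reverse.find? (fun p => c == p.2)) with
    | some v => simp
    | none =>
      simp only [Option.none_or]
      by_cases hc : c = p.2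
      · subst hc; simp [PySem.Dict.get?_insert_self, List.find?]
      · rw [List.find?_singleton, show (c == p.2) = false from beq_eq_false_iff_ne.mpr hc]
        simp [PySem.Dict.get?_insert_of_ne _ _ hc]

-- the first match of a value-decreasing list bounds every match
lemma pv_find_max (c : String) : ∀ (l : List (Int × String)),
    l.Pairwise (fun a b => b.1 ≤ a.1) → ∀ p, l.find? (fun q => c == q.2) = some p →
    p ∈ l ∧ p.2 = c ∧ ∀ q ∈ l, q.2 = c → q.1 ≤ p.1 := by
  intro l
  induction l with
  | nil => intro _ p hp; simp at hp
  | cons a l ih =>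
    intro hpw p hp
    rw [List.pairwise_cons] at hpw
    obtain ⟨ha, hl⟩ := hpw
    by_cases hc : (c == a.2) = true
    · rw [List.find?_cons_of_pos (p := fun q => c == q.2) (l := l) hc] at hp
      obtain rfl : a = p := by injection hp
      refine ⟨by simp, (beq_iff_eq.mp hc).symm, ?_⟩
      intro q hq _
      rcases List.mem_cons.mp hq with rfl | hq
      · exact le_refl _
      · exact ha q hq
    · rw [List.find?_cons_of_neg (p := fun q => c == q.2) (l := l) (by simpa using hc)] at hp
      obtain ⟨hmem, hpc, hub⟩ := ih hl p hp
      refine ⟨by simp [hmem], hpc, ?_⟩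
      intro q hq hqc
      rcases List.mem_cons.mp hq with rfl | hq
      · exact absurd (beq_iff_eq.mpr hqc.symm) hc
      · exact hub q hq hqc

-- membership of color-c records in the flattened table
lemma pv_mem_records (rs : List String) (q : Int × String) (c : String)
    (hc : c = "red" ∨ c = "green" ∨ c = "blue") :
    (q ∈ pvRecords rs ∧ q.2 = c) ↔ ∃ r ∈ rs, q = (pvValB r c, c) := by
  unfold pvRecords
  simp only [List.mem_flatMap, List.mem_cons, List.not_mem_nil, or_false]
  constructor
  · rintro ⟨⟨r, hr, hq⟩, hqc⟩
    refine ⟨r, hr, ?_⟩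
    rcases hc with rfl | rfl | rfl <;> rcases hq with rfl | rfl | rfl <;> simp_all
  · rintro ⟨r, hr, rfl⟩
    refine ⟨⟨r, hr, ?_⟩, rfl⟩
    rcases hc with rfl | rfl | rfl <;> simp

-- B's per-game value for color c is the maximum over the rounds
lemma pv_best_eq (rs : List String) (c : String)
    (hc : c = "red" ∨ c = "green" ∨ c = "blue") (hne : rs ≠ []) :
    ((PySem.List.sorted (pvRecords rs) (fun rec => rec.1) false).foldl
        (fun d p => d.insert p.2 p.1) PySem.Dict.empty).getD c 0 =
      ((rs.map (pvValB · c)).tail).foldl pvMx (pvValB (rs.headI) c) := by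
  obtain ⟨r0, rest, rfl⟩ := List.exists_cons_of_ne_nil hne
  have hpw0 := PySem.List.sorted_pairwise (pvRecords (r0 :: rest)) (fun rec => rec.1)
  have hperm := PySem.List.sorted_perm (pvRecords (r0 :: rest)) (fun rec => rec.1) false
  -- reason about the sorted table through a variable: only its ordering and its
  -- multiset of records matter
  generalize PySem.List.sorted (pvRecords (r0 :: rest)) (fun rec => rec.1) false = es
    at hpw0 hperm ⊢
  have hmemrec : ∀ r' ∈ r0 :: rest, (pvValB r' c, c) ∈ es := fun r' hr' =>
    hperm.mem_iff.mpr ((pv_mem_records (r0 :: rest) (pvValB r' c, c) c hc).mpr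
      ⟨r', hr', rfl⟩).1
  have hsome : (es.reverse.find? (fun q => c == q.2)).isSome := by
    rw [List.find?_isSome]
    exact ⟨_, List.mem_reverse.mpr (hmemrec r0 (by simp)), beq_iff_eq.mpr rfl⟩
  obtain ⟨p, hp⟩ := Option.isSome_iff_exists.mp hsome
  have hpwrev : es.reverse.Pairwise (fun a b => b.1 ≤ a.1) :=
    List.pairwise_reverse.mpr hpw0
  obtain ⟨hpmem, hpc, hub⟩ := pv_find_max c _ hpwrev p hp
  have hpmem' : p ∈ pvRecords (r0 :: rest) :=
    hperm.mem_iff.mp (List.mem_reverse.mp hpmem)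
  obtain ⟨r, hr, rfl⟩ := (pv_mem_records (r0 :: rest) p c hc).mp ⟨hpmem', hpc⟩
  -- every round's value is ≤ the found record's value
  have hub' : ∀ r' ∈ r0 :: rest, pvValB r' c ≤ pvValB r c := by
    intro r' hr'
    have h := hub (pvValB r' c, c) (List.mem_reverse.mpr (hmemrec r' hr')) rfl
    simpa using h
  -- read the dict
  rw [PySem.Dict.getD_eq_get?_getD, pv_look_get]
  simp only [hp, Option.map_some, Option.getD_some]
  -- the running max over the rounds equals pvValB r c
  rw [List.map_cons, List.tail_cons, List.headI_cons]
  symm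
  apply pv_fold_max_eq
  · rcases List.mem_cons.mp hr with rfl | hr
    · left; rfl
    · right; exact List.mem_map_of_mem hr
  · exact hub' r0 (by simp)
  · intro y hy
    obtain ⟨r', hr', rfl⟩ := List.mem_map.mp hy
    exact hub' r' (by simp [hr'])

-- A's and B's results agree game by game
lemma pv_game_eq (rs : List String) (h : rs.all pvRoundOk = true) :
    (rs.foldl pvStepR PySem.Dict.empty).items =
    (if rs.isEmpty then []
     else
      let records := rs.foldl (fun recs r =>
        recs ++ (["red", "green", "blue"].map (fun c => ((pvSeen r).getD c 0, c)))) []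
      let recs := PySem.List.sorted records (fun rec => rec.1) false
      let best := recs.foldl (fun d p => d.insert p.2 p.1) PySem.Dict.empty
      ["red", "green", "blue"].map (fun c => (c, best.getD c 0))) := by
  cases rs with
  | nil => rfl
  | cons r0 rest =>
    have hrecords : (r0 :: rest).foldl (fun recs r =>
        recs ++ (["red", "green", "blue"].map (fun c => ((pvSeen r).getD c 0, c)))) [] =
        pvRecords (r0 :: rest) := by
      rw [PySem.List.foldl_append_eq_flatMap]
      rfl
    simp only [List.all_cons, Bool.and_eq_true] at h
    obtain ⟨h0, hrest⟩ := h
    rw [List.foldl_cons, pv_step_empty, pv_fold_triple]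
    simp only [List.isEmpty_cons, Bool.false_eq_true, if_false, hrecords]
    have hval : ∀ c : String, c = "red" ∨ c = "green" ∨ c = "blue" →
        (rest.map (pvValA · c)).foldl pvMx (pvValA r0 c) =
        ((PySem.List.sorted (pvRecords (r0 :: rest)) (fun rec => rec.1) false).foldl
          (fun d p => d.insert p.2 p.1) PySem.Dict.empty).getD c 0 := by
      intro c hc
      have hall : ∀ x ∈ rest, pvRoundOk x = true := by
        rw [← List.all_eq_true]; exact hrest
      have hmap : rest.map (fun x => pvValA x c) = rest.map (fun x => pvValB x c) := by
        apply List.map_congr_left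
        intro r hr
        exact pv_val_eq r c (hall r hr)
      have h2 : (((r0 :: rest).map (fun x => pvValB x c)).tail).foldl pvMx
          (pvValB ((r0 :: rest).headI) c) =
          (rest.map (fun x => pvValA x c)).foldl pvMx (pvValA r0 c) := by
        rw [List.map_cons]
        rw [List.tail_cons]
        rw [List.headI_cons]
        rw [pv_val_eq r0 c h0]
        rw [hmap]
      rw [pv_best_eq (r0 :: rest) c hc (by simp), h2]
    rw [hval "red" (Or.inl rfl), hval "green" (Or.inr (Or.inl rfl)),
      hval "blue" (Or.inr (Or.inr rfl))]
    simp only [List.map_cons, List.map_nil]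
    rfl

-- ===== VERDICT (by name: the statement is the Claim_ definition above) =====
theorem get_minimum_set_list_spec : Claim_equal_get_minimum_set_list := by
  intro games _dom hpre
  unfold Spec_get_minimum_set_list get_minimum_set_list get_minimum_set_list_alt
  have hstep : (fun (result : List (List (String × Int))) (game : Int × List String) =>
      if game.2.isEmpty then result ++ [[]]
      else
        let records := game.2.foldl (fun recs r =>
          let seen := pvSeen r
          recs ++ (["red", "green", "blue"].map (fun c => (seen.getD c 0, c)))) []
        let recs := PySem.List.sorted records (fun rec => rec.1) false
        let best := recs.foldl (fun d p => d.insert p.2 p.1) PySem.Dict.empty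
        result ++ [["red", "green", "blue"].map (fun c => (c, best.getD c 0))]) =
      (fun result game => result ++ [if game.2.isEmpty then []
      else
        let records := game.2.foldl (fun recs r =>
          recs ++ (["red", "green", "blue"].map (fun c => ((pvSeen r).getD c 0, c)))) []
        let recs := PySem.List.sorted records (fun rec => rec.1) false
        let best := recs.foldl (fun d p => d.insert p.2 p.1) PySem.Dict.empty
        ["red", "green", "blue"].map (fun c => (c, best.getD c 0))]) := by
    funext result game
    split <;> rfl
  rw [hstep, PySem.List.foldl_append_singleton_eq_map,
    PySem.List.foldl_append_singleton_eq_map]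
  apply List.map_congr_left
  intro game hg
  have hall : ∀ g ∈ games, g.2.all pvRoundOk = true := by
    rw [← List.all_eq_true]; exact hpre
  exact pv_game_eq game.2 (hall game hg)
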